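-- pv_equiv track=rewrite | github.com/rahulswimmer/scalar_assignments_hw | countspecialindexes.py | solve
-- ===== SOURCE A (Python) =====
-- def solve(A):
--
--     # below code is tc o(n) and sc o(n)
--     # prefixSumOddArr = [0 for i in range(len(A))]
--     # prefixSumEvenArr = [0 for i in range(len(A))]
--
--     # for i in range(len(A)):
--     #     prefixSumOddArr[i]=prefixSumOddArr[i-1]
--     #     prefixSumEvenArr[i]=prefixSumEvenArr[i-1]
--     #     if i%2!=0:
--     #         prefixSumOddArr[i]+=A[i]
--     #     else:
--     #         prefixSumEvenArr[i]+=A[i]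
--
--     # for i in range(len(A)):
--     #     if prefixSumOddArr[i-1]+prefixSumEvenArr[len(A)-1]-prefixSumEvenArr[i]==prefixSumOddArr[len(A)-1]-prefixSumOddArr[i]+prefixSumEvenArr[i-1]:
--     #         return i
--
--     # below code is tc o(n) and sc o(1)
--     leftOdd,leftEven = 0,0
--     rightOdd, rightEven = 0,0
--     ans=0
--
--     for i in range(len(A)):
--         if i%2!=0:
--             rightOdd+=A[i]
--         else:
--             rightEven+=A[i]
--
--     for i in range(len(A)):
--         if i%2!=0:
--             rightOdd-=A[i]
--         else:
--             rightEven-=A[i]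
--
--         if leftOdd+rightEven==leftEven+rightOdd:
--             ans+=1
--
--         if i%2!=0:
--             leftOdd+=A[i]
--         else:
--             leftEven+=A[i]
--     return ans
-- ===== SOURCE B (Python) =====
-- def solve(A):
--     # Table-based reformulation: build the prefix alternating-sum table
--     # P (P[k] = sum of +A[j]/-A[j] for even/odd j < k); removing index k
--     # balances the odd/even sums iff P[k] + P[k+1] equals the total t,
--     # so count adjacent pairs of the table summing to t.
--     P = [0]
--     t = 0
--     for i, x in enumerate(A):
--         t += x if i % 2 == 0 else -x
--         P.append(t)
--     return sum(1 for a, b in zip(P, P[1:]) if a + b == t)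
-- ===== Notes on version B (the rewrite author's own statement) =====
-- stated objective: alternative
-- what changed: Replaces A's four sliding odd/even accumulators with a staged precompute-then-scan strategy: build the prefix alternating-sum table P once, then count adjacent pairs (P[k], P[k+1]) summing to the total, which is equivalent to A's balance condition.
import Mathlib
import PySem

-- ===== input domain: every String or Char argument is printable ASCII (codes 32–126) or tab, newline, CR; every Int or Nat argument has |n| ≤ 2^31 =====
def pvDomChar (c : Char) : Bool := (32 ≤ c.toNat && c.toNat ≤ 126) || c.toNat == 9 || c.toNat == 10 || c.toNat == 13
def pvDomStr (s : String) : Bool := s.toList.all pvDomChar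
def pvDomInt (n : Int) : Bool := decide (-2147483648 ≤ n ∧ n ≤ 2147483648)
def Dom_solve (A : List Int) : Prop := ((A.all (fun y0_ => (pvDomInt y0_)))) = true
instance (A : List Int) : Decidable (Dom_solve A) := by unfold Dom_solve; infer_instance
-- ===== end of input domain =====

-- B replaces A's four sliding odd/even accumulators with a staged strategy: build the
-- prefix alternating-sum table once, then count adjacent table pairs summing to the
-- total (alternative decomposition; same O(n) time).

-- ===== PORT A =====
-- step of A's first loop: accumulate (rightOdd, rightEven) over index i
def pvA1 (A : List Int) (s : Int × Int) (i : Int) : Int × Int :=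
  if PySem.Int.mod i 2 ≠ 0 then (s.1 + PySem.List.pyGetD A i 0, s.2)
  else (s.1, s.2 + PySem.List.pyGetD A i 0)

-- step of A's second loop: state (leftOdd, leftEven, rightOdd, rightEven, ans)
def pvA2 (A : List Int) (s : Int × Int × Int × Int × Int) (i : Int) :
    Int × Int × Int × Int × Int :=
  let x := PySem.List.pyGetD A i 0
  let lo := s.1; let le := s.2.1; let ro := s.2.2.1; let re := s.2.2.2.1; let ans := s.2.2.2.2
  let (ro, re) := if PySem.Int.mod i 2 ≠ 0 then (ro - x, re) else (ro, re - x)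
  let ans := if lo + re = le + ro then ans + 1 else ans
  let (lo, le) := if PySem.Int.mod i 2 ≠ 0 then (lo + x, le) else (lo, le + x)
  (lo, le, ro, re, ans)

def solve (A : List Int) : Int :=
  let r := (PySem.List.pyRange 0 (PySem.List.len A) 1).foldl (pvA1 A) (0, 0)
  let f := (PySem.List.pyRange 0 (PySem.List.len A) 1).foldl (pvA2 A) (0, 0, r.1, r.2, 0)
  f.2.2.2.2

-- ===== PORT B =====
-- signed contribution of an enumerated element: +x at even index, -x at odd index
def pvSgn (p : Int × Int) : Int :=
  if PySem.Int.mod p.1 2 = 0 then p.2 else -p.2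

-- step of B's table-building loop: state (P, t); t += signed x, P.append(t)
def pvBuild (s : List Int × Int) (p : Int × Int) : List Int × Int :=
  let t := s.2 + pvSgn p
  (s.1 ++ [t], t)

def solve_alt (A : List Int) : Int :=
  let r := (PySem.List.enumerate A 0).foldl pvBuild ([0], 0)
  -- sum(1 for a, b in zip(P, P[1:]) if a + b == t)
  ((r.1.zip (PySem.List.slice r.1 (some 1) none)).foldl
    (fun c q => if q.1 + q.2 = r.2 then c + 1 else c) 0)

-- ===== PRECONDITION & SPEC =====
def Spec_solve (A : List Int) (out : Int) : Prop := out = solve_alt A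
instance (A : List Int) (out : Int) : Decidable (Spec_solve A out) := by unfold Spec_solve; infer_instance

-- ===== CLAIM (what is proved, stated in full; the proofs are below) =====
def Claim_equal_solve : Prop := ∀ (A : List Int), Dom_solve A → Spec_solve A (solve A)

-- ===== LEMMAS AND PROOFS =====

-- pair-level versions of A's step functions (the loop bodies seen through enumerate)
def pvG1 (s : Int × Int) (p : Int × Int) : Int × Int :=
  if PySem.Int.mod p.1 2 ≠ 0 then (s.1 + p.2, s.2) else (s.1, s.2 + p.2)

def pvG2 (s : Int × Int × Int × Int × Int) (p : Int × Int) :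
    Int × Int × Int × Int × Int :=
  let x := p.2
  let lo := s.1; let le := s.2.1; let ro := s.2.2.1; let re := s.2.2.2.1; let ans := s.2.2.2.2
  let (ro, re) := if PySem.Int.mod p.1 2 ≠ 0 then (ro - x, re) else (ro, re - x)
  let ans := if lo + re = le + ro then ans + 1 else ans
  let (lo, le) := if PySem.Int.mod p.1 2 ≠ 0 then (lo + x, le) else (lo, le + x)
  (lo, le, ro, re, ans)

-- the total alternating sum of an enumerated list
def pvAlt (l : List (Int × Int)) : Int := (l.map pvSgn).sum

-- abstract count both programs compute: pairs (t, t + sgn) of consecutive prefix sums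
def pvCnt (T : Int) : Int → List (Int × Int) → Int
  | _, [] => 0
  | t, p :: l => (if t + (t + pvSgn p) = T then 1 else 0) + pvCnt T (t + pvSgn p) l

-- the prefix alternating-sum table B builds
def pvScan : Int → List (Int × Int) → List Int
  | t, [] => [t]
  | t, p :: l => t :: pvScan (t + pvSgn p) l

lemma pvConv1 (A : List Int) (s0 : Int × Int) :
    (PySem.List.pyRange 0 (PySem.List.len A) 1).foldl (pvA1 A) s0
      = (PySem.List.enumerate A 0).foldl pvG1 s0 := by
  rw [PySem.List.enumerate_eq_map_pyRange (d := 0), List.foldl_map]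
  rfl

lemma pvConv2 (A : List Int) (s0 : Int × Int × Int × Int × Int) :
    (PySem.List.pyRange 0 (PySem.List.len A) 1).foldl (pvA2 A) s0
      = (PySem.List.enumerate A 0).foldl pvG2 s0 := by
  rw [PySem.List.enumerate_eq_map_pyRange (d := 0), List.foldl_map]
  rfl

-- A's first loop computes (rightOdd, rightEven) with rightEven - rightOdd = pvAlt l
lemma pvFirst (l : List (Int × Int)) (a b : Int) :
    (l.foldl pvG1 (a, b)).2 - (l.foldl pvG1 (a, b)).1 = b - a + pvAlt l := by
  induction l generalizing a b with
  | nil => simp [pvAlt]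
  | cons p t ih =>
    by_cases hp : PySem.Int.mod p.1 2 = 0 <;>
      simp only [pvG1, pvAlt, pvSgn, hp, List.foldl_cons, List.map_cons, List.sum_cons,
        ne_eq, not_true_eq_false, not_false_eq_true, if_true, if_false,
        ih] <;> ring

-- A's second loop computes ans + pvCnt over the consecutive prefix alternating sums
lemma pvKey (l : List (Int × Int)) (lo le ro re ans P : Int)
    (h1 : P = le - lo) (h2 : re - ro = pvAlt l) :
    (l.foldl pvG2 (lo, le, ro, re, ans)).2.2.2.2
      = ans + pvCnt (P + pvAlt l) P l := by
  induction l generalizing lo le ro re ans P with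
  | nil => simp [pvCnt]
  | cons p t ih =>
    simp only [List.foldl_cons]
    by_cases hp : PySem.Int.mod p.1 2 = 0
    · have hsg : pvSgn p = p.2 := by simp only [pvSgn, hp, if_true]
      have halt : pvAlt (p :: t) = p.2 + pvAlt t := by
        simp only [pvAlt, List.map_cons, List.sum_cons, hsg]
      have hG2 : pvG2 (lo, le, ro, re, ans) p
          = (lo, le + p.2, ro, re - p.2,
             if lo + (re - p.2) = le + ro then ans + 1 else ans) := by
        simp only [pvG2, hp, ne_eq, not_true_eq_false, if_false]
      rw [hG2]
      rw [ih lo (le + p.2) ro (re - p.2) _ (P + p.2) (by omega) (by omega)]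
      have hcond : (lo + (re - p.2) = le + ro) ↔ (P + (P + pvSgn p) = P + pvAlt (p :: t)) := by
        rw [hsg, halt]; omega
      have hT : P + p.2 + pvAlt t = P + pvAlt (p :: t) := by rw [halt]; ring
      rw [hT]
      rw [hsg] at hcond
      simp only [pvCnt, hsg]
      split_ifs with hA hB hB <;> omega
    · have hsg : pvSgn p = -p.2 := by simp only [pvSgn, hp, if_false]
      have halt : pvAlt (p :: t) = -p.2 + pvAlt t := by
        simp only [pvAlt, List.map_cons, List.sum_cons, hsg]
      have hG2 : pvG2 (lo, le, ro, re, ans) p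
          = (lo + p.2, le, ro - p.2, re,
             if lo + re = le + (ro - p.2) then ans + 1 else ans) := by
        simp only [pvG2, hp, ne_eq, not_false_eq_true, if_true]
      rw [hG2]
      rw [ih (lo + p.2) le (ro - p.2) re _ (P + -p.2) (by omega) (by omega)]
      have hcond : (lo + re = le + (ro - p.2)) ↔ (P + (P + pvSgn p) = P + pvAlt (p :: t)) := by
        rw [hsg, halt]; omega
      have hT : P + -p.2 + pvAlt t = P + pvAlt (p :: t) := by rw [halt]; ring
      rw [hT]
      rw [hsg] at hcond
      simp only [pvCnt, hsg]
      split_ifs with hA hB hB <;> omega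

-- B's building loop produces the scan table and the total alternating sum
lemma pvBuildEq (l : List (Int × Int)) (s : List Int) (t : Int) :
    l.foldl pvBuild (s ++ [t], t) = (s ++ pvScan t l, t + pvAlt l) := by
  induction l generalizing s t with
  | nil => simp [pvScan, pvAlt]
  | cons p m ih =>
    simp only [List.foldl_cons, pvBuild]
    rw [show (s ++ [t]) ++ [t + pvSgn p] = (s ++ [t]) ++ [t + pvSgn p] from rfl]
    rw [ih (s ++ [t]) (t + pvSgn p)]
    simp [pvScan, pvAlt, add_assoc]

-- counting adjacent pairs of the scan table equals pvCnt
lemma pvZipCnt (T : Int) (l : List (Int × Int)) (t c : Int) :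
    ((pvScan t l).zip ((pvScan t l).drop 1)).foldl
        (fun c q => if q.1 + q.2 = T then c + 1 else c) c
      = c + pvCnt T t l := by
  induction l generalizing t c with
  | nil => simp [pvScan, pvCnt]
  | cons p m ih =>
    obtain ⟨tl, hX⟩ : ∃ tl, pvScan (t + pvSgn p) m = (t + pvSgn p) :: tl := by
      cases m <;> exact ⟨_, rfl⟩
    simp only [pvScan, hX, List.drop_succ_cons, List.drop_zero, List.zip_cons_cons,
      List.foldl_cons]
    rw [← hX]
    have hdr : List.drop 1 (pvScan (t + pvSgn p) m) = tl := by rw [hX]; rfl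
    rw [← hdr, ih (t + pvSgn p)]
    simp only [pvCnt]
    split_ifs <;> ring

theorem solve_spec : Claim_equal_solve := by
  intro A _
  unfold Spec_solve solve solve_alt
  simp only [pvConv1, pvConv2]
  rw [show ([(0 : Int)], (0 : Int)) = (([] : List Int) ++ [(0 : Int)], (0 : Int)) from rfl,
    pvBuildEq]
  simp only [List.nil_append, PySem.List.slice_from_one, zero_add]
  rw [← List.drop_one, pvZipCnt]
  have h2 := pvFirst (PySem.List.enumerate A 0) 0 0
  rw [pvKey (PySem.List.enumerate A 0) 0 0
    ((PySem.List.enumerate A 0).foldl pvG1 (0, 0)).1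
    ((PySem.List.enumerate A 0).foldl pvG1 (0, 0)).2 0 0 (by ring) (by omega)]
  simp
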